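-- pv_equiv track=rewrite | github.com/adriansev/jalien_py | alienpy/xrd_tools.py | extract_glob_pattern
-- ===== SOURCE A (Python) =====
-- def extract_glob_pattern(path_arg: str) -> tuple:
--     """Extract glob pattern from a path"""
--     if not path_arg: return '', ''
--     base_path = pattern = ''
--     if '*' in path_arg:  # we have globbing in src path
--         path_components = path_arg.split("/")
--         base_path_arr = []  # let's establish the base path
--         for el in path_components:
--             if '*' not in el: base_path_arr.append(el)
--             else: break
--
--         for el in base_path_arr: path_components.remove(el)  # remove the base path components (those without *) from full path components
--         base_path = f'{"/".join(base_path_arr)}{"/" if base_path_arr else ""}'  # rewrite the source path without the globbing part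
--         pattern = '/'.join(path_components)  # the globbing part is the rest of element that contain *
--     else:
--         base_path = path_arg
--     return (base_path, pattern)
-- ===== SOURCE B (Python) =====
-- def extract_glob_pattern(path_arg: str) -> tuple:
--     """Extract glob pattern from a path (single left-to-right scan)."""
--     if not path_arg:
--         return '', ''
--     cut = 0  # index just past the last '/' seen so far
--     for i, ch in enumerate(path_arg):
--         if ch == '/':
--             cut = i + 1
--         elif ch == '*':
--             return path_arg[:cut], path_arg[cut:]
--     return path_arg, ''
-- ===== Notes on version B (the rewrite author's own statement) =====
-- stated objective: alternative
-- what changed: Replaces A's split-into-components / append-until-star / list.remove / join pipeline by a single left-to-right character scan that tracks the index just past the last '/' seen and slices the path there at the first '*'.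
import Mathlib
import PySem

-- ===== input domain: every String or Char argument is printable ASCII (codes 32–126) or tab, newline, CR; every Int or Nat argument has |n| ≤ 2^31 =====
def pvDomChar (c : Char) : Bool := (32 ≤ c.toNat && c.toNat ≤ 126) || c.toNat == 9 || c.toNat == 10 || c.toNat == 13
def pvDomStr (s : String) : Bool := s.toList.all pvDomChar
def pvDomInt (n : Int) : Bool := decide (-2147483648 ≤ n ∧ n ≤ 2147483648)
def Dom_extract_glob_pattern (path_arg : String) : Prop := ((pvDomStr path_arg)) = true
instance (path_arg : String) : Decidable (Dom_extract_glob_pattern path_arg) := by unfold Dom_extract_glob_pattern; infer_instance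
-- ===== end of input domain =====

-- B replaces A's split/append-break/remove/join component pipeline by a single left-to-right
-- character scan that returns the index just past the last '/' before the first '*' (objective: alternative).

-- ===== PORT A =====
-- 'for el in path_components: if '*' not in el: append(el) else: break'
def aBaseArr : List (List Char) → List (List Char)
  | [] => []
  | el :: rest => if PySem.Chars.isIn ['*'] el then [] else el :: aBaseArr rest

def extract_glob_pattern (path_arg : String) : String × String :=
  if path_arg.toList = [] then ("", "")
  else if PySem.Chars.isIn ['*'] path_arg.toList then
    let path_components := PySem.Chars.splitOn path_arg.toList ['/']
    let base_path_arr := aBaseArr path_components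
    -- 'for el in base_path_arr: path_components.remove(el)'; Python's list.remove never raises
    -- here (each el is the current head of path_components), so the .getD branch is unreachable
    let path_components := base_path_arr.foldl (fun pc el => (PySem.List.remove? pc el).getD pc) path_components
    let base_path := PySem.Chars.join ['/'] base_path_arr ++ (if base_path_arr ≠ [] then ['/'] else [])
    (String.mk base_path, String.mk (PySem.Chars.join ['/'] path_components))
  else (path_arg, "")

-- ===== PORT B =====
-- the scan: cut = index just past the last '/' seen so far; at the first '*' return cut; none = no '*'
def altScan : List Char → Nat → Nat → Option Nat
  | [], _, _ => none
  | c :: rest, i, cut =>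
    if c = '/' then altScan rest (i+1) (i+1)
    else if c = '*' then some cut
    else altScan rest (i+1) cut

def extract_glob_pattern_alt (path_arg : String) : String × String :=
  if path_arg.toList = [] then ("", "")
  else
    match altScan path_arg.toList 0 0 with
    -- path_arg[:cut] / path_arg[cut:] with 0 ≤ cut ≤ len(path_arg): exactly take/drop
    | some cut => (String.mk (path_arg.toList.take cut), String.mk (path_arg.toList.drop cut))
    | none => (path_arg, "")

-- ===== PRECONDITION & SPEC =====
def Spec_extract_glob_pattern (path_arg : String) (out : String × String) : Prop := out = extract_glob_pattern_alt path_arg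
instance (path_arg : String) (out : String × String) : Decidable (Spec_extract_glob_pattern path_arg out) := by unfold Spec_extract_glob_pattern; infer_instance

-- ===== CLAIM (what is proved, stated in full; the proofs are below) =====
def Claim_equal_extract_glob_pattern : Prop := ∀ (path_arg : String), Dom_extract_glob_pattern path_arg → Spec_extract_glob_pattern path_arg (extract_glob_pattern path_arg)

-- ===== LEMMAS AND PROOFS =====

def pvSplit : List Char → List (List Char)
  | [] => [[]]
  | c :: r => if c = '/' then [] :: pvSplit r else (pvSplit r).modifyHead (c :: ·)

theorem pvSplit_ne_nil (l : List Char) : pvSplit l ≠ [] := by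
  induction l with
  | nil => simp [pvSplit]
  | cons c r ih =>
    simp only [pvSplit]
    split
    · simp
    · cases h : pvSplit r with
      | nil => exact absurd h ih
      | cons a t => simp

theorem go_eq (fuel : Nat) (l cur : List Char) (acc : List (List Char)) (h : l.length ≤ fuel) :
    PySem.Chars.splitOn.go ['/'] fuel l cur acc
      = acc.reverse ++ (pvSplit l).modifyHead (cur.reverse ++ ·) := by
  induction fuel generalizing l cur acc with
  | zero =>
    have : l = [] := by cases l <;> simp_all
    subst this
    simp [PySem.Chars.splitOn.go, pvSplit]
  | succ fuel ih =>
    cases l with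
    | nil => simp [PySem.Chars.splitOn.go, pvSplit]
    | cons c rest =>
      simp only [PySem.Chars.splitOn.go]
      by_cases hc : c = '/'
      · subst hc
        rw [if_pos (by simp [List.isPrefixOf])]
        simp only [List.length_cons, List.drop_succ_cons, List.length_nil, List.drop_zero]
        rw [ih rest [] (cur.reverse :: acc) (by simpa using Nat.le_of_succ_le_succ (by simpa using h))]
        simp [pvSplit]
        cases pvSplit rest <;> simp
      · rw [if_neg (by simp [List.isPrefixOf]; exact fun he => hc he.symm)]
        rw [ih rest (c :: cur) acc (by simpa using Nat.le_of_succ_le_succ (by simpa using h))]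
        simp only [pvSplit, if_neg hc]
        cases hs : pvSplit rest with
        | nil => exact absurd hs (pvSplit_ne_nil rest)
        | cons a t => simp

theorem splitOn_eq (l : List Char) : PySem.Chars.splitOn l ['/'] = pvSplit l := by
  rw [PySem.Chars.splitOn, go_eq _ _ _ _ (by omega)]
  simp
  cases pvSplit l <;> simp

theorem join_pvSplit (l : List Char) : PySem.Chars.join ['/'] (pvSplit l) = l := by
  induction l with
  | nil => simp [pvSplit, PySem.Chars.join_singleton]
  | cons c r ih =>
    simp only [pvSplit]
    by_cases hc : c = '/'
    · subst hc; rw [if_pos rfl]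
      cases hs : pvSplit r with
      | nil => exact absurd hs (pvSplit_ne_nil r)
      | cons a t =>
        rw [hs] at ih
        rw [PySem.Chars.join_cons_cons]
        simpa using ih
    · rw [if_neg hc]
      cases hs : pvSplit r with
      | nil => exact absurd hs (pvSplit_ne_nil r)
      | cons a t =>
        rw [hs] at ih
        cases t with
        | nil => simp_all [PySem.Chars.join_singleton]
        | cons b t' =>
          rw [List.modifyHead_cons, PySem.Chars.join_cons_cons] at *
          simpa using ih


theorem star_in_iff (l : List Char) : PySem.Chars.isIn ['*'] l = true ↔ '*' ∈ l := by
  rw [PySem.Chars.isIn_iff_infix]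
  constructor
  · intro h; exact h.mem (by simp)
  · intro h
    obtain ⟨s, t, rfl⟩ := List.append_of_mem h
    exact ⟨s, t, by simp⟩

theorem aBaseArr_eq_takeWhile (cs : List (List Char)) :
    aBaseArr cs = cs.takeWhile (fun el => !PySem.Chars.isIn ['*'] el) := by
  induction cs with
  | nil => rfl
  | cons el rest ih =>
    simp only [aBaseArr, List.takeWhile_cons]
    by_cases h : PySem.Chars.isIn ['*'] el <;> simp [h, ih]

theorem removeLoop (pre suf : List (List Char)) :
    List.foldl (fun pc el => ((PySem.List.remove? pc el).getD pc)) (pre ++ suf) pre = suf := by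
  induction pre with
  | nil => rfl
  | cons a pre' ih => simpa [PySem.List.remove?_cons_self] using ih

theorem altScan_none (l : List Char) (i cut : Nat) : altScan l i cut = none ↔ '*' ∉ l := by
  induction l generalizing i cut with
  | nil => simp [altScan]
  | cons c rest ih =>
    simp only [altScan]
    by_cases hc : c = '/'
    · subst hc; simp [ih]
    · by_cases hs : c = '*'
      · subst hs; simp
      · rw [if_neg hc, if_neg hs, ih]
        simp only [List.mem_cons, not_or]
        constructor
        · intro h; exact ⟨fun he => hs he.symm, h⟩
        · intro h; exact h.2

theorem altScan_shift (l : List Char) (i cut : Nat) :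
    altScan l i cut = match altScan l 0 0 with
      | none => none
      | some 0 => some cut
      | some (k+1) => some (i + k + 1) := by
  induction l generalizing i cut with
  | nil => simp [altScan]
  | cons c rest ih =>
    by_cases hc : c = '/'
    · subst hc
      simp only [altScan, if_pos rfl]
      rw [ih (i+1) (i+1), ih 1 1]
      rcases h : altScan rest 0 0 with _ | k
      · simp
      · cases k <;> simp <;> omega
    · by_cases hs : c = '*'
      · subst hs; simp [altScan, hc]
      · simp only [altScan, if_neg hc, if_neg hs]
        rw [ih (i+1) cut, ih 1 0]
        rcases h : altScan rest 0 0 with _ | k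
        · simp
        · cases k <;> simp <;> omega

theorem mainLemma (l : List Char) (h : '*' ∈ l) :
    ∃ cut, altScan l 0 0 = some cut ∧
      PySem.Chars.join ['/'] ((pvSplit l).takeWhile (fun el => !PySem.Chars.isIn ['*'] el))
        ++ (if (pvSplit l).takeWhile (fun el => !PySem.Chars.isIn ['*'] el) ≠ [] then ['/'] else [])
        = l.take cut ∧
      PySem.Chars.join ['/'] ((pvSplit l).dropWhile (fun el => !PySem.Chars.isIn ['*'] el)) = l.drop cut := by
  induction l with
  | nil => simp at h
  | cons c r ih =>
    by_cases hc : c = '/'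
    · subst hc
      have hr : '*' ∈ r := by
        rcases List.mem_cons.mp h with h' | h'
        · exact absurd h' (by decide)
        · exact h'
      obtain ⟨cut, hscan, hbase, hpat⟩ := ih hr
      refine ⟨cut + 1, ?_, ?_, ?_⟩
      · simp only [altScan, if_pos rfl]
        rw [altScan_shift r 1 1, hscan]
        cases cut <;> simp <;> omega
      · have hnil : (!PySem.Chars.isIn ['*'] ([] : List Char)) = true := by decide
        simp only [pvSplit, if_pos rfl, List.takeWhile_cons, hnil, if_true]
        rw [List.take_succ_cons, ← hbase]
        cases htw : (pvSplit r).takeWhile (fun el => !PySem.Chars.isIn ['*'] el) with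
        | nil => simp [PySem.Chars.join_singleton]
        | cons a t => simp [PySem.Chars.join_cons_cons]
      · have hnil : (!PySem.Chars.isIn ['*'] ([] : List Char)) = true := by decide
        simp only [pvSplit, if_pos rfl, List.dropWhile_cons, hnil, if_true]
        rw [List.drop_succ_cons, hpat]
    · obtain ⟨hd, t, hs⟩ : ∃ hd t, pvSplit r = hd :: t := by
        cases hsp : pvSplit r with
        | nil => exact absurd hsp (pvSplit_ne_nil r)
        | cons a t => exact ⟨a, t, rfl⟩
      have hsl : pvSplit (c :: r) = (c :: hd) :: t := by
        simp [pvSplit, if_neg hc, hs]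
      by_cases hstar : '*' = c ∨ '*' ∈ hd
      · -- first component of c::r contains '*': base is empty, pattern is the whole path
        have hok : PySem.Chars.isIn ['*'] (c :: hd) = true :=
          (star_in_iff _).mpr (List.mem_cons.mpr hstar)
        refine ⟨0, ?_, ?_, ?_⟩
        · by_cases hcs : c = '*'
          · subst hcs; simp [altScan]
          · have hrs : '*' ∈ r := by
              rcases List.mem_cons.mp h with h' | h'
              · exact absurd h'.symm hcs
              · exact h'
            obtain ⟨cut, hscan, hbase, hpat⟩ := ih hrs
            have hhd : ¬ ('*' = c) := fun he => hcs he.symm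
            have hmem : '*' ∈ hd := hstar.resolve_left hhd
            have htw : (pvSplit r).takeWhile (fun el => !PySem.Chars.isIn ['*'] el) = [] := by
              rw [hs, List.takeWhile_cons, if_neg (by simp [(star_in_iff hd).mpr hmem])]
            rw [htw] at hbase
            simp only [PySem.Chars.join_nil, ne_eq, not_true_eq_false, if_false, List.nil_append] at hbase
            have hr0 : r ≠ [] := by rintro rfl; simp at hrs
            have hcut : cut = 0 := by
              rcases List.take_eq_nil_iff.mp hbase.symm with h0 | h0
              · exact h0
              · exact absurd h0 hr0
            subst hcut
            simp only [altScan, if_neg hc, if_neg hcs]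
            rw [altScan_shift r 1 0, hscan]
        · rw [hsl]
          simp [List.takeWhile_cons, hok, PySem.Chars.join_nil]
        · rw [hsl]
          rw [List.dropWhile_cons]
          simp only [hok, Bool.not_true, Bool.false_eq_true, if_false]
          rw [← hsl, join_pvSplit]
          simp
      · -- first component clean: step into r
        push_neg at hstar
        obtain ⟨hne, hnm⟩ := hstar
        have hcs : c ≠ '*' := fun he => hne (he.symm)
        have hrs : '*' ∈ r := by
          rcases List.mem_cons.mp h with h' | h'
          · exact absurd h'.symm hcs
          · exact h'
        obtain ⟨cut, hscan, hbase, hpat⟩ := ih hrs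
        have hokhd : PySem.Chars.isIn ['*'] hd = false := by
          rcases hh : PySem.Chars.isIn ['*'] hd with _ | _
          · rfl
          · exact absurd ((star_in_iff hd).mp hh) hnm
        have hokc : PySem.Chars.isIn ['*'] (c :: hd) = false := by
          rcases hh : PySem.Chars.isIn ['*'] (c :: hd) with _ | _
          · rfl
          · rcases List.mem_cons.mp ((star_in_iff _).mp hh) with h' | h'
            · exact absurd h' hne
            · exact absurd h' hnm
        rw [hs] at hbase hpat
        simp only [List.takeWhile_cons, hokhd, Bool.not_false, if_true] at hbase
        simp only [List.dropWhile_cons, hokhd, Bool.not_false, if_true] at hpat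
        have hcut0 : cut ≠ 0 := by
          intro h0; subst h0
          simp only [List.take_zero] at hbase
          rcases List.append_eq_nil_iff.mp hbase with ⟨-, h2⟩
          simp at h2
        obtain ⟨k, rfl⟩ : ∃ k, cut = k + 1 := ⟨cut - 1, by omega⟩
        refine ⟨k + 2, ?_, ?_, ?_⟩
        · simp only [altScan, if_neg hc, if_neg hcs]
          rw [altScan_shift r 1 0, hscan]
          simp only []
          congr 1
          omega
        · rw [hsl]
          simp only [List.takeWhile_cons, hokc, Bool.not_false, if_true]
          rw [show k + 2 = (k + 1) + 1 from rfl, List.take_succ_cons, ← hbase]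
          cases htw : t.takeWhile (fun el => !PySem.Chars.isIn ['*'] el) with
          | nil => simp [PySem.Chars.join_singleton]
          | cons a t' => simp [PySem.Chars.join_cons_cons]
        · rw [hsl]
          simp only [List.dropWhile_cons, hokc, Bool.not_false, if_true]
          rw [show k + 2 = (k + 1) + 1 from rfl, List.drop_succ_cons, hpat]

-- ===== VERDICT (by name: the statement is the Claim_ definition above) =====
theorem extract_glob_pattern_spec : Claim_equal_extract_glob_pattern := by
  intro path_arg _
  unfold Spec_extract_glob_pattern extract_glob_pattern extract_glob_pattern_alt
  by_cases hne : path_arg.toList = []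
  · simp [hne]
  · rw [if_neg hne, if_neg hne]
    by_cases hin : PySem.Chars.isIn ['*'] path_arg.toList = true
    · rw [if_pos hin]
      have hmem := (star_in_iff _).mp hin
      obtain ⟨cut, hscan, hbase, hpat⟩ := mainLemma _ hmem
      rw [hscan]
      have hrem : List.foldl (fun pc el => ((PySem.List.remove? pc el).getD pc))
          (pvSplit path_arg.toList)
          ((pvSplit path_arg.toList).takeWhile (fun el => !PySem.Chars.isIn ['*'] el))
          = (pvSplit path_arg.toList).dropWhile (fun el => !PySem.Chars.isIn ['*'] el) := by
        have h := removeLoop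
          ((pvSplit path_arg.toList).takeWhile (fun el => !PySem.Chars.isIn ['*'] el))
          ((pvSplit path_arg.toList).dropWhile (fun el => !PySem.Chars.isIn ['*'] el))
        rwa [List.takeWhile_append_dropWhile] at h
      simp only [splitOn_eq, aBaseArr_eq_takeWhile, hrem, hbase, hpat]
    · rw [if_neg hin]
      have hnm : '*' ∉ path_arg.toList := fun hm => hin ((star_in_iff _).mpr hm)
      rw [(altScan_none _ 0 0).mpr hnm]
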